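-- pv_equiv track=rewrite | github.com/odri96352/omique2 | dc3.py | ordre
-- ===== SOURCE A (Python) =====
-- def ordre(R):
--     index=1
--     ordre=[1]
--     for i in range(1, len(R)):
--         if R[i-1]==R[i] :
--             ordre.append(index)
--             index=index
--
--         else :
--             index+=1
--             ordre.append(index)
--
--     return ordre
-- ===== SOURCE B (Python) =====
-- def ordre(R):
--     # Run-length grouping: split R into maximal runs of equal values; run k
--     # (1-based) contributes len(run) copies of k. Empty input naturally gives an empty rank list.
--     out = []
--     rank = 0
--     i = 0
--     n = len(R)
--     while i < n:
--         j = i + 1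
--         while j < n and R[j] == R[i]:
--             j += 1
--         rank += 1
--         out += [rank] * (j - i)
--         i = j
--     return out
-- ===== Notes on version B (the rewrite author's own statement) =====
-- stated objective: alternative
-- what changed: A's fused per-element loop threading a rank counter over adjacent comparisons is replaced by run-length grouping: an outer loop finds each maximal run of equal values and emits a whole block [rank]*len(run) per run.
-- intended difference: On the empty list A returns its pre-seeded one-element rank list containing 1 (a rank for a non-existent element), while B returns an empty rank list, the intended value for ranking zero elements. — e.g. on ordre([]): A returns [1], B returns []
import Mathlib
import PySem

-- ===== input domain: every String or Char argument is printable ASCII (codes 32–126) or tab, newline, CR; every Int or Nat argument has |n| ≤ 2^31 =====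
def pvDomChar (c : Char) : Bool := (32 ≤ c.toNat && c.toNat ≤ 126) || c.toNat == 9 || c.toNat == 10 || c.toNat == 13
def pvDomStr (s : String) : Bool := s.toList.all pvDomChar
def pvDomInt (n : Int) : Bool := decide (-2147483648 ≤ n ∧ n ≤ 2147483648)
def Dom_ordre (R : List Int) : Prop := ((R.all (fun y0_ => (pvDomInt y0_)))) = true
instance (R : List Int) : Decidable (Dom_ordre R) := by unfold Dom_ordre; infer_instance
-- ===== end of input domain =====

-- B replaces A's fused per-element rank counter by run-length grouping (emit one block per maximal run); alternative decomposition, same cost. On the empty list B returns an empty rank list where A returns its pre-seeded one-element list (see D_ordre).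

-- ===== PORT A =====
-- R[i-1] / R[i] with i ∈ range(1, len(R)) are always in range, so pyGetD with default 0 is exact.
def ordre (R : List Int) : List Int :=
  ((PySem.List.pyRange 1 (R.length : Int) 1).foldl
    (fun (st : Int × List Int) i =>
      if PySem.List.pyGetD R (i - 1) 0 = PySem.List.pyGetD R i 0 then
        (st.1, st.2 ++ [st.1])
      else
        (st.1 + 1, st.2 ++ [st.1 + 1]))
    (1, [1])).2

-- ===== PORT B =====
-- Source B's inner index scan 'j while R[j] == R[i]' is the takeWhile/dropWhile split of the
-- suffix at the current run; each outer iteration emits one block [rank]*(run length).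
def ordreAltGo (rest : List Int) (rank : Int) : List Int :=
  match rest with
  | [] => []
  | x :: xs =>
      let run := xs.takeWhile (fun y => y = x)
      let tail := xs.dropWhile (fun y => y = x)
      List.replicate (1 + run.length) (rank + 1) ++ ordreAltGo tail (rank + 1)
termination_by rest.length
decreasing_by
  simp only [List.length_cons]
  exact Nat.lt_succ_of_le (List.length_dropWhile_le _ _)

def ordre_alt (R : List Int) : List Int := ordreAltGo R 0

-- ===== PRECONDITION & SPEC =====
-- On the empty list A returns its pre-seeded one-element rank list containing 1 (a rank for a non-existent element); B returns an empty rank list, the intended value for ranking zero elements.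
def D_ordre (R : List Int) : Prop := R = []
instance (R : List Int) : Decidable (D_ordre R) := by unfold D_ordre; infer_instance

def Spec_ordre (R : List Int) (out : List Int) : Prop := ¬ D_ordre R → out = ordre_alt R
instance (R : List Int) (out : List Int) : Decidable (Spec_ordre R out) := by unfold Spec_ordre; infer_instance

def pvDiffWitness_ordre : List Int := []
def pvDiffWitnessOut_ordre : (List Int) × (List Int) := ([1], [])

-- ===== CLAIM (what is proved, stated in full; the proofs are below) =====
def Claim_unchanged_ordre : Prop := ∀ (R : List Int), Dom_ordre R → Spec_ordre R (ordre R)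
def Claim_changed_ordre : Prop := Dom_ordre (pvDiffWitness_ordre) ∧ D_ordre (pvDiffWitness_ordre) ∧ ordre (pvDiffWitness_ordre) = pvDiffWitnessOut_ordre.1 ∧ ordre_alt (pvDiffWitness_ordre) = pvDiffWitnessOut_ordre.2 ∧ pvDiffWitnessOut_ordre.1 ≠ pvDiffWitnessOut_ordre.2
def Claim_exact_ordre : Prop := ∀ (R : List Int), Dom_ordre R → D_ordre R → ordre R ≠ ordre_alt R

-- ===== LEMMAS AND PROOFS =====

-- A's index range, mapped through the pair of lookups it performs, is exactly the adjacent-pair list.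
lemma pairs_of_range (R : List Int) :
    (PySem.List.pyRange 1 (R.length : Int) 1).map
        (fun i => (PySem.List.pyGetD R (i - 1) 0, PySem.List.pyGetD R i 0))
      = R.zip (R.drop 1) := by
  apply List.ext_getElem
  · simp [PySem.List.length_pyRange_one]
  · intro k h1 h2
    have h1' : k < (PySem.List.pyRange 1 (R.length : Int) 1).length := by
      simpa using h1
    have hk : k < R.length - 1 := by
      rw [PySem.List.length_pyRange_one] at h1'; omega
    have hi : (PySem.List.pyRange 1 (R.length : Int) 1)[k] = 1 + (k : Int) :=
      PySem.List.getElem_pyRange_one 1 (R.length : Int) k h1'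
    simp only [List.getElem_map, List.getElem_zip, List.getElem_drop, hi, Prod.mk.injEq]
    refine ⟨?_, ?_⟩
    · rw [PySem.List.pyGetD_eq_getElem R 0 (by omega) (by omega)]
      congr 1; omega
    · rw [PySem.List.pyGetD_eq_getElem R 0 (by omega) (by omega)]
      congr 1

-- A's loop recast as structural recursion over the list (prev element, rest, current rank).
def gA (x : Int) (xs : List Int) (idx : Int) : List Int :=
  match xs with
  | [] => []
  | y :: ys => if x = y then idx :: gA y ys idx else (idx + 1) :: gA y ys (idx + 1)

lemma foldA (xs : List Int) : ∀ (x idx : Int) (acc : List Int),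
    (((x :: xs).zip xs).foldl
      (fun (st : Int × List Int) p =>
        if p.1 = p.2 then (st.1, st.2 ++ [st.1]) else (st.1 + 1, st.2 ++ [st.1 + 1]))
      (idx, acc)).2 = acc ++ gA x xs idx := by
  induction xs with
  | nil => intro x idx acc; simp [gA]
  | cons y ys ih =>
    intro x idx acc
    simp only [List.zip_cons_cons, List.foldl_cons, gA]
    by_cases h : x = y
    · rw [if_pos h, if_pos h, ih y idx (acc ++ [idx])]
      simp
    · rw [if_neg h, if_neg h, ih y (idx + 1) (acc ++ [idx + 1])]
      simp

lemma A_as_pairs (R : List Int) :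
    ordre R = ((R.zip (R.drop 1)).foldl
      (fun (st : Int × List Int) p =>
        if p.1 = p.2 then (st.1, st.2 ++ [st.1]) else (st.1 + 1, st.2 ++ [st.1 + 1]))
      (1, [1])).2 := by
  unfold ordre
  rw [← pairs_of_range R, List.foldl_map]

lemma ordre_cons (x : Int) (xs : List Int) : ordre (x :: xs) = 1 :: gA x xs 1 := by
  rw [A_as_pairs]
  have h1 : (x :: xs).drop 1 = xs := rfl
  rw [h1, foldA]
  simp

-- The tail part of a run decomposition of gA.
def gTail (d : List Int) (idx : Int) : List Int :=
  match d with
  | [] => []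
  | z :: zs => (idx + 1) :: gA z zs (idx + 1)

-- gA over a list splits at the end of the current run.
lemma gA_run (xs : List Int) : ∀ (x idx : Int),
    gA x xs idx = List.replicate (xs.takeWhile (fun y => y = x)).length idx
      ++ gTail (xs.dropWhile (fun y => y = x)) idx := by
  induction xs with
  | nil => intro x idx; simp [gA, gTail]
  | cons y ys ih =>
    intro x idx
    by_cases h : x = y
    · subst h
      rw [gA, if_pos rfl, ih x idx]
      simp [List.replicate_succ]
    · have h' : ¬ (y = x) := fun hh => h hh.symm
      rw [gA, if_neg h]
      simp only [List.takeWhile_cons, List.dropWhile_cons]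
      rw [if_neg (by simpa using h'), if_neg (by simpa using h')]
      simp [gTail]

-- B's run loop equals A's recast loop, with B's rank one behind A's idx.
lemma altGo_eq (n : Nat) : ∀ (xs : List Int) (x r : Int), xs.length ≤ n →
    ordreAltGo (x :: xs) r = (r + 1) :: gA x xs (r + 1) := by
  induction n with
  | zero =>
    intro xs x r h
    have : xs = [] := List.eq_nil_of_length_eq_zero (Nat.le_zero.mp h)
    subst this
    simp [ordreAltGo, gA]
  | succ n ih =>
    intro xs x r h
    rw [ordreAltGo]
    rw [gA_run xs x (r + 1)]
    have htail : ordreAltGo (xs.dropWhile (fun y => y = x)) (r + 1)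
        = gTail (xs.dropWhile (fun y => y = x)) (r + 1) := by
      cases hd : xs.dropWhile (fun y => y = x) with
      | nil => simp [ordreAltGo, gTail]
      | cons z zs =>
        have hz : zs.length ≤ n := by
          have hle := List.length_dropWhile_le (fun y => decide (y = x)) xs
          have heq : (xs.dropWhile (fun y => decide (y = x))).length = zs.length + 1 := by
            rw [hd]; rfl
          omega
        rw [gTail, ih zs z (r + 1) hz]
    rw [htail]
    rw [Nat.add_comm 1, List.replicate_succ, List.cons_append]

-- ===== VERDICT =====
theorem ordre_alt_nil : ordre_alt [] = [] := by
  unfold ordre_alt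
  rw [ordreAltGo]

theorem ordre_spec : Claim_unchanged_ordre := by
  intro R _
  unfold Spec_ordre D_ordre
  intro hne
  cases R with
  | nil => exact absurd rfl hne
  | cons x xs =>
    rw [ordre_cons]
    unfold ordre_alt
    rw [altGo_eq xs.length xs x 0 le_rfl]
    norm_num

theorem ordre_changed : Claim_changed_ordre := by
  unfold Claim_changed_ordre
  exact ⟨by decide, rfl, by decide, ordre_alt_nil, by decide⟩

theorem ordre_tight : Claim_exact_ordre := by
  intro R _ hD
  unfold D_ordre at hD
  subst hD
  rw [ordre_alt_nil]
  decide
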